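-- pv_equiv track=rewrite | github.com/taguka/Algorithms | PA2_01/P2_01.py | dfs
-- ===== SOURCE A (Python) =====
-- def dfs(G, iterator):
--     time=0
--     finish_time=dict()
--     visited=set()
--     Q=[]
--     leader=dict()
--     for i in iterator:
--         if i in visited:
--             continue
--         cn=0
--         Q.append(i)
--         while Q:
--             v=Q.pop()
--             if v not in visited:
--                 visited.add(v)
--                 Q.append(v)
--                 cn=cn+1
--                 try:
--                     for u in G[v]:
--                         if u not in visited:
--                             Q.append(u)
--                 except KeyError:
--                     pass
--             else:
--                 if v not in finish_time:
--                     time+=1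
--                     finish_time[v]=time
--         leader[i]=cn
--     return finish_time, leader
-- ===== SOURCE B (Python) =====
-- def dfs(G, iterator):
--     time = 0
--     finish_time = dict()
--     visited = set()
--     leader = dict()
--     for i in iterator:
--         if i in visited:
--             continue
--         visited.add(i)
--         cn = 1
--         stack = [(i, list(G.get(i, [])))]
--         while stack:
--             v, nbrs = stack[-1]
--             if nbrs:
--                 u = nbrs.pop()
--                 if u not in visited:
--                     visited.add(u)
--                     cn = cn + 1
--                     stack.append((u, list(G.get(u, []))))
--             else:
--                 stack.pop()
--                 time += 1
--                 finish_time[v] = time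
--         leader[i] = cn
--     return finish_time, leader
-- ===== Notes on version B (the rewrite author's own statement) =====
-- stated objective: alternative
-- what changed: B replaces A's push-twice stack (which re-pushes every neighbor and re-pops stale duplicates, using a guarded finish-time write) with a frame stack of (node, remaining-neighbors) pairs: each edge is examined once at pop time and a node is finished unconditionally when its frame is exhausted.
import Mathlib
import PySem

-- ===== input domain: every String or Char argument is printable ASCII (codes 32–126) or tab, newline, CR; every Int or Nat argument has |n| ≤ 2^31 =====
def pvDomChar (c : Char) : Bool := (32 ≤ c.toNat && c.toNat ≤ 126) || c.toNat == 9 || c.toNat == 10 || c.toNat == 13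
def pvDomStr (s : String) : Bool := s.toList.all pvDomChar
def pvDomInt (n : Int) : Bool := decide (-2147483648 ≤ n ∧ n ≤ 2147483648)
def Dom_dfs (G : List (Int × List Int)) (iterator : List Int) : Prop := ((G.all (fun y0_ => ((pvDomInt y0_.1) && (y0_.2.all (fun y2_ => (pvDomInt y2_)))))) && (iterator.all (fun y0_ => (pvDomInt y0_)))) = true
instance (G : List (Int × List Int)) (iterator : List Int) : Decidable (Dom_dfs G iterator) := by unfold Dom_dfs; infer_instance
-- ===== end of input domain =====

-- B replaces A's push-twice DFS stack by a frame stack of (node, remaining-neighbors) pairs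
-- (each edge looked at once, unconditional finish at frame pop); same return value, proved below.

-- shared loop state: (time, finish_time, visited, cn) — exactly the Python locals
structure DfsSt where
  time : Int
  ft : PySem.Dict Int Int
  vis : PySem.Set Int
  cn : Int

-- ===== PORT A =====
-- all neighbour values stored in the dict (used only for the termination measure)
def pvUni (d : PySem.Dict Int (List Int)) : List Int := d.items.flatMap (fun p => p.2)

def pvCardA (d : PySem.Dict Int (List Int)) (vis : List Int) (Q : List Int) : Nat :=
  ((pvUni d ++ Q).toFinset \ vis.toFinset).card

lemma pv_mem_getD_uni {d : PySem.Dict Int (List Int)} {v x : Int}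
    (hx : x ∈ d.getD v []) : x ∈ pvUni d := by
  rw [PySem.Dict.getD_eq_get?_getD] at hx
  cases h : d.get? v with
  | none => rw [h] at hx; simp at hx
  | some l =>
    rw [h] at hx; simp at hx
    exact List.mem_flatMap.mpr ⟨(v, l), PySem.Dict.mem_items_of_get?_eq_some (d := d) h, hx⟩

lemma pv_decA_skip (d : PySem.Dict Int (List Int)) (vis : List Int) (Q : List Int) (h : Q ≠ []) :
    pvCardA d vis Q.dropLast ≤ pvCardA d vis Q := by
  apply Finset.card_le_card
  intro x hx
  simp only [Finset.mem_sdiff, List.mem_toFinset, List.mem_append] at hx ⊢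
  refine ⟨hx.1.imp (fun h => h) (fun h => List.dropLast_subset _ h), hx.2⟩

lemma pv_decA_visit (d : PySem.Dict Int (List Int)) (vis : List Int) (Q ns : List Int)
    (hQ : Q ≠ []) (hv : Q.getLast hQ ∉ vis) (hns : ∀ x ∈ ns, x ∈ pvUni d) :
    pvCardA d (PySem.Set.add vis (Q.getLast hQ)) (Q.dropLast ++ [Q.getLast hQ] ++ ns)
      < pvCardA d vis Q := by
  set v := Q.getLast hQ with hvdef
  have hvS : v ∈ (pvUni d ++ Q).toFinset \ vis.toFinset := by
    simp only [Finset.mem_sdiff, List.mem_toFinset, List.mem_append]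
    exact ⟨Or.inr (List.getLast_mem hQ), hv⟩
  have hsub : ((pvUni d ++ (Q.dropLast ++ [v] ++ ns)).toFinset \ (PySem.Set.add vis v).toFinset)
      ⊆ ((pvUni d ++ Q).toFinset \ vis.toFinset).erase v := by
    intro x hx
    simp only [Finset.mem_sdiff, List.mem_toFinset, List.mem_append, Finset.mem_erase,
      PySem.Set.mem_add, List.mem_singleton] at hx ⊢
    have hxv : x ≠ v := fun h => hx.2 (Or.inr h)
    have hxvis : x ∉ vis := fun h => hx.2 (Or.inl h)
    refine ⟨hxv, ?_, hxvis⟩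
    rcases hx.1 with h | ((h | h) | h)
    · exact Or.inl h
    · exact Or.inr (List.dropLast_subset _ h)
    · exact absurd h hxv
    · exact Or.inl (hns x h)
  calc _ ≤ (((pvUni d ++ Q).toFinset \ vis.toFinset).erase v).card := Finset.card_le_card hsub
    _ < ((pvUni d ++ Q).toFinset \ vis.toFinset).card := Finset.card_erase_lt_of_mem hvS

-- A's while loop: Q is the Python list, pop = last element
def whileA (d : PySem.Dict Int (List Int)) (st : DfsSt) (Q : List Int) : DfsSt :=
  if hQ : Q = [] then st
  else
    if hv : (Q.getLast hQ) ∉ st.vis then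
      -- visited.add(v); Q.append(v); cn += 1; push unvisited neighbours (G[v] via try/except = getD v [])
      whileA d ⟨st.time, st.ft, PySem.Set.add st.vis (Q.getLast hQ), st.cn + 1⟩
        (Q.dropLast ++ [Q.getLast hQ] ++
          ((d.getD (Q.getLast hQ) []).filter
            (fun u => decide (u ∉ PySem.Set.add st.vis (Q.getLast hQ)))))
    else
      -- if v not in finish_time: time += 1; finish_time[v] = time
      if st.ft.contains (Q.getLast hQ) = false then
        whileA d ⟨st.time + 1, st.ft.insert (Q.getLast hQ) (st.time + 1), st.vis, st.cn⟩ Q.dropLast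
      else
        whileA d st Q.dropLast
termination_by (pvCardA d st.vis Q, Q.length)
decreasing_by
  · exact Prod.Lex.left _ _ (pv_decA_visit d st.vis Q _ hQ hv
      (fun x hx => pv_mem_getD_uni (List.mem_of_mem_filter hx)))
  · rcases (pv_decA_skip d st.vis Q hQ).lt_or_eq with h | h
    · exact Prod.Lex.left _ _ h
    · rw [h]; exact Prod.Lex.right _ (by
        have h1 : Q.dropLast.length = Q.length - 1 := List.length_dropLast
        have h2 : Q.length ≠ 0 := fun h0 => hQ (List.eq_nil_of_length_eq_zero h0)
        omega)
  · rcases (pv_decA_skip d st.vis Q hQ).lt_or_eq with h | h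
    · exact Prod.Lex.left _ _ h
    · rw [h]; exact Prod.Lex.right _ (by
        have h1 : Q.dropLast.length = Q.length - 1 := List.length_dropLast
        have h2 : Q.length ≠ 0 := fun h0 => hQ (List.eq_nil_of_length_eq_zero h0)
        omega)

def dfs (G : List (Int × List Int)) (iterator : List Int) : (List (Int × Int)) × (List (Int × Int)) :=
  let d := PySem.Dict.ofList G
  let r := iterator.foldl
    (fun (p : DfsSt × PySem.Dict Int Int) i =>
      if i ∈ p.1.vis then p
      else
        let st' := whileA d ⟨p.1.time, p.1.ft, p.1.vis, 0⟩ [i]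
        (st', p.2.insert i st'.cn))
    (⟨0, PySem.Dict.empty, PySem.Set.empty, 0⟩, PySem.Dict.empty)
  (r.1.ft.items, r.2.items)

-- ===== PORT B =====
def pvCardB (d : PySem.Dict Int (List Int)) (vis : List Int) (fs : List (Int × List Int)) : Nat :=
  ((pvUni d ++ fs.flatMap Prod.snd).toFinset \ vis.toFinset).card

lemma pv_decB_sub (d : PySem.Dict Int (List Int)) (vis : List Int)
    (fs fs' : List (Int × List Int))
    (hsub : ∀ x : Int, x ∈ fs'.flatMap Prod.snd → x ∈ pvUni d ∨ x ∈ fs.flatMap Prod.snd) :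
    pvCardB d vis fs' ≤ pvCardB d vis fs := by
  apply Finset.card_le_card
  intro x hx
  simp only [Finset.mem_sdiff, List.mem_toFinset, List.mem_append] at hx ⊢
  refine ⟨?_, hx.2⟩
  rcases hx.1 with h | h
  · exact Or.inl h
  · rcases hsub x (List.mem_flatMap.mpr (by simpa using h)) with h2 | h2
    · exact Or.inl h2
    · exact Or.inr (by simpa using List.mem_flatMap.mp h2)

lemma pv_flat_getLast (fs : List (Int × List Int)) (hf : fs ≠ []) :
    fs.flatMap Prod.snd = fs.dropLast.flatMap Prod.snd ++ (fs.getLast hf).2 := by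
  conv_lhs => rw [← List.dropLast_append_getLast hf]
  simp

lemma pv_decB_visit (d : PySem.Dict Int (List Int)) (vis : List Int)
    (fs fs' : List (Int × List Int)) (u : Int)
    (hu : u ∉ vis) (humem : u ∈ fs.flatMap Prod.snd)
    (hsub : ∀ x, x ∈ fs'.flatMap Prod.snd → x = u ∨ x ∈ pvUni d ∨ x ∈ fs.flatMap Prod.snd) :
    pvCardB d (PySem.Set.add vis u) fs' < pvCardB d vis fs := by
  have huS : u ∈ (pvUni d ++ fs.flatMap Prod.snd).toFinset \ vis.toFinset := by
    simp only [Finset.mem_sdiff, List.mem_toFinset, List.mem_append]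
    exact ⟨Or.inr humem, hu⟩
  have hsub2 : ((pvUni d ++ fs'.flatMap Prod.snd).toFinset \ (PySem.Set.add vis u).toFinset)
      ⊆ ((pvUni d ++ fs.flatMap Prod.snd).toFinset \ vis.toFinset).erase u := by
    intro x hx
    simp only [Finset.mem_sdiff, List.mem_toFinset, List.mem_append, Finset.mem_erase,
      PySem.Set.mem_add] at hx ⊢
    have hxu : x ≠ u := fun h => hx.2 (Or.inr h)
    have hxvis : x ∉ vis := fun h => hx.2 (Or.inl h)
    refine ⟨hxu, ?_, hxvis⟩
    rcases hx.1 with h | h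
    · exact Or.inl h
    · rcases hsub x h with h | h | h
      · exact absurd h hxu
      · exact Or.inl h
      · exact Or.inr h
  calc _ ≤ (((pvUni d ++ fs.flatMap Prod.snd).toFinset \ vis.toFinset).erase u).card :=
        Finset.card_le_card hsub2
    _ < _ := Finset.card_erase_lt_of_mem huS

-- B's while loop: fs is the Python frame stack of (v, remaining-neighbours) pairs, top = last
def whileB (d : PySem.Dict Int (List Int)) (st : DfsSt) (fs : List (Int × List Int)) : DfsSt :=
  if hf : fs = [] then st
  else
    if hn : (fs.getLast hf).2 ≠ [] then
      -- u = nbrs.pop()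
      if hu : ((fs.getLast hf).2.getLast hn) ∉ st.vis then
        whileB d ⟨st.time, st.ft, PySem.Set.add st.vis ((fs.getLast hf).2.getLast hn), st.cn + 1⟩
          (fs.dropLast ++ [((fs.getLast hf).1, (fs.getLast hf).2.dropLast),
            (((fs.getLast hf).2.getLast hn), d.getD ((fs.getLast hf).2.getLast hn) [])])
      else
        whileB d st (fs.dropLast ++ [((fs.getLast hf).1, (fs.getLast hf).2.dropLast)])
    else
      -- stack.pop(); time += 1; finish_time[v] = time
      whileB d ⟨st.time + 1, st.ft.insert (fs.getLast hf).1 (st.time + 1), st.vis, st.cn⟩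
        fs.dropLast
termination_by (pvCardB d st.vis fs, (fs.flatMap Prod.snd).length + fs.length)
decreasing_by
  · apply Prod.Lex.left
    apply pv_decB_visit d st.vis fs _ _ hu
    · exact List.mem_flatMap.mpr ⟨fs.getLast hf, List.getLast_mem hf,
        List.getLast_mem hn⟩
    · intro x hx
      simp only [List.flatMap_append, List.mem_append] at hx
      rcases hx with h | h
      · exact Or.inr (Or.inr (List.mem_flatMap.mp h |>.elim
          (fun p hp => List.mem_flatMap.mpr ⟨p, List.dropLast_subset _ hp.1, hp.2⟩)))
      · simp only [List.flatMap_cons, List.flatMap_nil, List.append_nil, List.mem_append] at h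
        rcases h with h | h
        · exact Or.inr (Or.inr (List.mem_flatMap.mpr ⟨fs.getLast hf, List.getLast_mem hf,
            List.dropLast_subset _ h⟩))
        · exact Or.inr (Or.inl (pv_mem_getD_uni h))
  · -- already-visited neighbour: frame shrinks, card does not grow
    have he := pv_flat_getLast fs hf
    have hle : pvCardB d st.vis
        (fs.dropLast ++ [((fs.getLast hf).1, (fs.getLast hf).2.dropLast)])
        ≤ pvCardB d st.vis fs := by
      apply pv_decB_sub
      intro x hx
      refine Or.inr ?_
      rw [he]
      simp only [List.flatMap_append, List.flatMap_cons, List.flatMap_nil, List.append_nil,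
        List.mem_append] at hx ⊢
      exact hx.imp id (fun h => List.dropLast_subset _ h)
    have hlen : ((fs.dropLast ++ [((fs.getLast hf).1, (fs.getLast hf).2.dropLast)]).flatMap
          Prod.snd).length +
          (fs.dropLast ++ [((fs.getLast hf).1, (fs.getLast hf).2.dropLast)]).length
        < (fs.flatMap Prod.snd).length + fs.length := by
      rw [he]
      have h1 : (fs.getLast hf).2.dropLast.length = (fs.getLast hf).2.length - 1 :=
        List.length_dropLast
      have h2 : (fs.getLast hf).2.length ≠ 0 := fun h0 => hn (List.eq_nil_of_length_eq_zero h0)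
      have h3 : fs.dropLast.length = fs.length - 1 := List.length_dropLast
      have h4 : fs.length ≠ 0 := fun h0 => hf (List.eq_nil_of_length_eq_zero h0)
      simp only [List.flatMap_append, List.flatMap_cons, List.flatMap_nil, List.append_nil,
        List.length_append, List.length_cons, List.length_nil, h1, h3]
      omega
    rcases hle.lt_or_eq with h | h
    · exact Prod.Lex.left _ _ h
    · rw [h]; exact Prod.Lex.right _ hlen
  · -- neighbours exhausted: frame popped, card unchanged
    push_neg at hn
    have he := pv_flat_getLast fs hf
    rw [hn, List.append_nil] at he
    have hcard : pvCardB d st.vis fs.dropLast = pvCardB d st.vis fs := by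
      unfold pvCardB; rw [he]
    rw [hcard]
    apply Prod.Lex.right
    rw [he]
    have h3 : fs.dropLast.length = fs.length - 1 := List.length_dropLast
    have h4 : fs.length ≠ 0 := fun h0 => hf (List.eq_nil_of_length_eq_zero h0)
    omega

def dfs_alt (G : List (Int × List Int)) (iterator : List Int) : (List (Int × Int)) × (List (Int × Int)) :=
  let d := PySem.Dict.ofList G
  let r := iterator.foldl
    (fun (p : DfsSt × PySem.Dict Int Int) i =>
      if i ∈ p.1.vis then p
      else
        let st' := whileB d ⟨p.1.time, p.1.ft, PySem.Set.add p.1.vis i, 1⟩ [(i, d.getD i [])]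
        (st', p.2.insert i st'.cn))
    (⟨0, PySem.Dict.empty, PySem.Set.empty, 0⟩, PySem.Dict.empty)
  (r.1.ft.items, r.2.items)

-- ===== PRECONDITION & SPEC =====
def Spec_dfs (G : List (Int × List Int)) (iterator : List Int) (out : (List (Int × Int)) × (List (Int × Int))) : Prop := out = dfs_alt G iterator
instance (G : List (Int × List Int)) (iterator : List Int) (out : (List (Int × Int)) × (List (Int × Int))) : Decidable (Spec_dfs G iterator out) := by unfold Spec_dfs; infer_instance

-- ===== CLAIM (what is proved, stated in full; the proofs are below) =====
def Claim_equal_dfs : Prop := ∀ (G : List (Int × List Int)) (iterator : List Int), Dom_dfs G iterator → Spec_dfs G iterator (dfs G iterator)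

-- ===== LEMMAS AND PROOFS =====

-- one-step unfolding lemmas for whileA (pop = last element)
lemma whileA_nil (d : PySem.Dict Int (List Int)) (st : DfsSt) : whileA d st [] = st := by
  rw [whileA]; simp

lemma whileA_concat_visit (d : PySem.Dict Int (List Int)) (st : DfsSt) (Q : List Int) (v : Int)
    (hv : v ∉ st.vis) :
    whileA d st (Q ++ [v]) =
      whileA d ⟨st.time, st.ft, PySem.Set.add st.vis v, st.cn + 1⟩
        (Q ++ [v] ++ ((d.getD v []).filter (fun u => decide (u ∉ PySem.Set.add st.vis v)))) := by
  rw [whileA]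
  rw [dif_neg (by simp : ¬(Q ++ [v] = []))]
  simp only [List.getLast_concat, List.dropLast_concat]
  rw [dif_pos hv]

lemma whileA_concat_fin (d : PySem.Dict Int (List Int)) (st : DfsSt) (Q : List Int) (v : Int)
    (hv : v ∈ st.vis) (hft : st.ft.contains v = false) :
    whileA d st (Q ++ [v]) =
      whileA d ⟨st.time + 1, st.ft.insert v (st.time + 1), st.vis, st.cn⟩ Q := by
  rw [whileA]
  rw [dif_neg (by simp : ¬(Q ++ [v] = []))]
  simp only [List.getLast_concat, List.dropLast_concat]
  rw [dif_neg (by simpa using hv), if_pos hft]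

lemma whileA_concat_skip (d : PySem.Dict Int (List Int)) (st : DfsSt) (Q : List Int) (v : Int)
    (hv : v ∈ st.vis) (hft : st.ft.contains v = true) :
    whileA d st (Q ++ [v]) = whileA d st Q := by
  rw [whileA]
  rw [dif_neg (by simp : ¬(Q ++ [v] = []))]
  simp only [List.getLast_concat, List.dropLast_concat]
  rw [dif_neg (by simpa using hv), if_neg (by simp [hft])]

-- one-step unfolding lemmas for whileB (top frame = last element)
lemma whileB_nil (d : PySem.Dict Int (List Int)) (st : DfsSt) : whileB d st [] = st := by
  rw [whileB]; simp

lemma whileB_concat_fin (d : PySem.Dict Int (List Int)) (st : DfsSt)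
    (fs : List (Int × List Int)) (v : Int) :
    whileB d st (fs ++ [(v, ([] : List Int))]) =
      whileB d ⟨st.time + 1, st.ft.insert v (st.time + 1), st.vis, st.cn⟩ fs := by
  rw [whileB]
  rw [dif_neg (by simp : ¬(fs ++ [(v, ([] : List Int))] = []))]
  simp only [List.getLast_concat, List.dropLast_concat]
  rw [dif_neg (by simp)]

lemma whileB_concat_visit (d : PySem.Dict Int (List Int)) (st : DfsSt)
    (fs : List (Int × List Int)) (v : Int) (l : List Int) (hn : l ≠ [])
    (hu : l.getLast hn ∉ st.vis) :
    whileB d st (fs ++ [(v, l)]) =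
      whileB d ⟨st.time, st.ft, PySem.Set.add st.vis (l.getLast hn), st.cn + 1⟩
        (fs ++ [(v, l.dropLast), (l.getLast hn, d.getD (l.getLast hn) [])]) := by
  rw [whileB]
  rw [dif_neg (by simp : ¬(fs ++ [(v, l)] = []))]
  simp only [List.getLast_concat, List.dropLast_concat]
  rw [dif_pos hn, dif_pos hu]

lemma whileB_concat_skip (d : PySem.Dict Int (List Int)) (st : DfsSt)
    (fs : List (Int × List Int)) (v : Int) (l : List Int) (hn : l ≠ [])
    (hu : l.getLast hn ∈ st.vis) :
    whileB d st (fs ++ [(v, l)]) = whileB d st (fs ++ [(v, l.dropLast)]) := by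
  rw [whileB]
  rw [dif_neg (by simp : ¬(fs ++ [(v, l)] = []))]
  simp only [List.getLast_concat, List.dropLast_concat]
  rw [dif_pos hn, dif_neg (by simpa using hu)]

-- stack locality: the run consumes the top part of the stack first and never looks below it
lemma whileA_append (d : PySem.Dict Int (List Int)) (st : DfsSt) (Q2 Q1 : List Int) :
    whileA d st (Q1 ++ Q2) = whileA d (whileA d st Q2) Q1 := by
  induction st, Q2 using whileA.induct (d := d) generalizing Q1 with
  | case1 st => rw [List.append_nil, whileA_nil]
  | case2 st Q hQ hv ih =>
    rcases List.eq_nil_or_concat Q with rfl | ⟨Q0, v, rfl⟩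
    · exact absurd rfl hQ
    · simp only [List.concat_eq_append, List.getLast_concat, List.dropLast_concat] at hv ih ⊢
      rw [← List.append_assoc Q1 Q0 [v], whileA_concat_visit d st (Q1 ++ Q0) v hv,
        whileA_concat_visit d st Q0 v hv]
      simp only [List.append_assoc] at ih ⊢
      exact ih Q1
  | case3 st Q hQ hv hft ih =>
    rcases List.eq_nil_or_concat Q with rfl | ⟨Q0, v, rfl⟩
    · exact absurd rfl hQ
    · simp only [List.concat_eq_append, List.getLast_concat, List.dropLast_concat,
        Decidable.not_not] at hv hft ih ⊢
      rw [← List.append_assoc Q1 Q0 [v], whileA_concat_fin d st (Q1 ++ Q0) v hv hft,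
        whileA_concat_fin d st Q0 v hv hft]
      exact ih Q1
  | case4 st Q hQ hv hft ih =>
    rcases List.eq_nil_or_concat Q with rfl | ⟨Q0, v, rfl⟩
    · exact absurd rfl hQ
    · simp only [List.concat_eq_append, List.getLast_concat, List.dropLast_concat,
        Decidable.not_not] at hv hft ih ⊢
      rw [← List.append_assoc Q1 Q0 [v], whileA_concat_skip d st (Q1 ++ Q0) v hv (by simpa using hft),
        whileA_concat_skip d st Q0 v hv (by simpa using hft)]
      exact ih Q1

lemma whileB_append (d : PySem.Dict Int (List Int)) (st : DfsSt)
    (fs2 fs1 : List (Int × List Int)) :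
    whileB d st (fs1 ++ fs2) = whileB d (whileB d st fs2) fs1 := by
  induction st, fs2 using whileB.induct (d := d) generalizing fs1 with
  | case1 st => rw [List.append_nil, whileB_nil]
  | case2 st fs hf hn hu ih =>
    rcases List.eq_nil_or_concat fs with rfl | ⟨fs0, ⟨fv, fl⟩, rfl⟩
    · exact absurd rfl hf
    · simp only [List.concat_eq_append, List.getLast_concat, List.dropLast_concat] at hn hu ih ⊢
      rw [← List.append_assoc fs1 fs0 [(fv, fl)], whileB_concat_visit d st (fs1 ++ fs0) fv fl hn hu,
        whileB_concat_visit d st fs0 fv fl hn hu]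
      simp only [List.append_assoc] at ih ⊢
      exact ih fs1
  | case3 st fs hf hn hu ih =>
    rcases List.eq_nil_or_concat fs with rfl | ⟨fs0, ⟨fv, fl⟩, rfl⟩
    · exact absurd rfl hf
    · simp only [List.concat_eq_append, List.getLast_concat, List.dropLast_concat,
        Decidable.not_not] at hn hu ih ⊢
      rw [← List.append_assoc fs1 fs0 [(fv, fl)], whileB_concat_skip d st (fs1 ++ fs0) fv fl hn (by simpa using hu),
        whileB_concat_skip d st fs0 fv fl hn (by simpa using hu)]
      simp only [List.append_assoc] at ih ⊢
      exact ih fs1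
  | case4 st fs hf hn ih =>
    rcases List.eq_nil_or_concat fs with rfl | ⟨fs0, ⟨fv, fl⟩, rfl⟩
    · exact absurd rfl hf
    · simp only [List.concat_eq_append, List.getLast_concat, List.dropLast_concat,
        Decidable.not_not] at hn ih ⊢
      subst hn
      rw [← List.append_assoc fs1 fs0 [(fv, [])], whileB_concat_fin d st (fs1 ++ fs0) fv,
        whileB_concat_fin d st fs0 fv]
      exact ih fs1

-- facts about a completed whileB run, each by functional induction
lemma wB_vis_mono (d : PySem.Dict Int (List Int)) (st : DfsSt) (fs : List (Int × List Int)) :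
    ∀ x, x ∈ st.vis → x ∈ (whileB d st fs).vis := by
  induction st, fs using whileB.induct (d := d) with
  | case1 st => intro x hx; rwa [whileB_nil]
  | case2 st fs hf hn hu ih =>
    rcases List.eq_nil_or_concat fs with rfl | ⟨fs0, ⟨fv, fl⟩, rfl⟩
    · exact absurd rfl hf
    · simp only [List.concat_eq_append, List.getLast_concat, List.dropLast_concat] at hn hu ih ⊢
      intro x hx
      rw [whileB_concat_visit d st fs0 fv fl hn hu]
      exact ih x ((PySem.Set.mem_add _ _ _).mpr (Or.inl hx))
  | case3 st fs hf hn hu ih =>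
    rcases List.eq_nil_or_concat fs with rfl | ⟨fs0, ⟨fv, fl⟩, rfl⟩
    · exact absurd rfl hf
    · simp only [List.concat_eq_append, List.getLast_concat, List.dropLast_concat,
        Decidable.not_not] at hn hu ih ⊢
      intro x hx
      rw [whileB_concat_skip d st fs0 fv fl hn (by simpa using hu)]
      exact ih x hx
  | case4 st fs hf hn ih =>
    rcases List.eq_nil_or_concat fs with rfl | ⟨fs0, ⟨fv, fl⟩, rfl⟩
    · exact absurd rfl hf
    · simp only [List.concat_eq_append, List.getLast_concat, List.dropLast_concat,
        Decidable.not_not] at hn ih ⊢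
      subst hn
      intro x hx
      rw [whileB_concat_fin d st fs0 fv]
      exact ih x hx

lemma wB_ft_mono (d : PySem.Dict Int (List Int)) (st : DfsSt) (fs : List (Int × List Int)) :
    ∀ x, st.ft.contains x = true → (whileB d st fs).ft.contains x = true := by
  induction st, fs using whileB.induct (d := d) with
  | case1 st => intro x hx; rwa [whileB_nil]
  | case2 st fs hf hn hu ih =>
    rcases List.eq_nil_or_concat fs with rfl | ⟨fs0, ⟨fv, fl⟩, rfl⟩
    · exact absurd rfl hf
    · simp only [List.concat_eq_append, List.getLast_concat, List.dropLast_concat] at hn hu ih ⊢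
      intro x hx
      rw [whileB_concat_visit d st fs0 fv fl hn hu]
      exact ih x hx
  | case3 st fs hf hn hu ih =>
    rcases List.eq_nil_or_concat fs with rfl | ⟨fs0, ⟨fv, fl⟩, rfl⟩
    · exact absurd rfl hf
    · simp only [List.concat_eq_append, List.getLast_concat, List.dropLast_concat,
        Decidable.not_not] at hn hu ih ⊢
      intro x hx
      rw [whileB_concat_skip d st fs0 fv fl hn (by simpa using hu)]
      exact ih x hx
  | case4 st fs hf hn ih =>
    rcases List.eq_nil_or_concat fs with rfl | ⟨fs0, ⟨fv, fl⟩, rfl⟩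
    · exact absurd rfl hf
    · simp only [List.concat_eq_append, List.getLast_concat, List.dropLast_concat,
        Decidable.not_not] at hn ih ⊢
      subst hn
      intro x hx
      rw [whileB_concat_fin d st fs0 fv]
      exact ih x (by simp [PySem.Dict.contains_insert, hx])

-- every node that a whileB run newly visits, and every frame vertex, ends up finished
lemma wB_fin (d : PySem.Dict Int (List Int)) (st : DfsSt) (fs : List (Int × List Int)) :
    ∀ x, (x ∈ fs.map Prod.fst ∨ (x ∉ st.vis ∧ x ∈ (whileB d st fs).vis)) →
      (whileB d st fs).ft.contains x = true := by
  induction st, fs using whileB.induct (d := d) with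
  | case1 st =>
    intro x hx
    rw [whileB_nil] at hx ⊢
    rcases hx with h | ⟨h1, h2⟩
    · simp at h
    · exact absurd h2 h1
  | case2 st fs hf hn hu ih =>
    rcases List.eq_nil_or_concat fs with rfl | ⟨fs0, ⟨fv, fl⟩, rfl⟩
    · exact absurd rfl hf
    · simp only [List.concat_eq_append, List.getLast_concat, List.dropLast_concat] at hn hu ih ⊢
      intro x hx
      rw [whileB_concat_visit d st fs0 fv fl hn hu] at hx ⊢
      apply ih x
      rcases hx with h | ⟨h1, h2⟩
      · simp only [List.map_append, List.map_cons, List.mem_append, List.mem_cons] at h ⊢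
        tauto
      · by_cases hxu : x = fl.getLast hn
        · subst hxu
          simp
        · refine Or.inr ⟨?_, h2⟩
          intro hmem
          rcases (PySem.Set.mem_add _ _ _).mp hmem with h | h
          · exact h1 h
          · exact hxu h
  | case3 st fs hf hn hu ih =>
    rcases List.eq_nil_or_concat fs with rfl | ⟨fs0, ⟨fv, fl⟩, rfl⟩
    · exact absurd rfl hf
    · simp only [List.concat_eq_append, List.getLast_concat, List.dropLast_concat,
        Decidable.not_not] at hn hu ih ⊢
      intro x hx
      rw [whileB_concat_skip d st fs0 fv fl hn (by simpa using hu)] at hx ⊢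
      apply ih x
      rcases hx with h | h
      · refine Or.inl ?_
        simp only [List.map_append, List.map_cons, List.mem_append, List.mem_cons] at h ⊢
        tauto
      · exact Or.inr h
  | case4 st fs hf hn ih =>
    rcases List.eq_nil_or_concat fs with rfl | ⟨fs0, ⟨fv, fl⟩, rfl⟩
    · exact absurd rfl hf
    · simp only [List.concat_eq_append, List.getLast_concat, List.dropLast_concat,
        Decidable.not_not] at hn ih ⊢
      subst hn
      intro x hx
      rw [whileB_concat_fin d st fs0 fv] at hx ⊢
      rcases hx with h | ⟨h1, h2⟩
      · simp only [List.map_append, List.map_cons, List.map_nil, List.mem_append,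
          List.mem_cons, List.mem_singleton] at h
        rcases h with h | h | h
        · exact ih x (Or.inl h)
        · subst h
          exact wB_ft_mono d _ fs0 x (by simp [PySem.Dict.contains_insert])
        · simp at h
      · exact ih x (Or.inr ⟨h1, h2⟩)

-- whileB only ever finishes frame vertices and newly visited nodes
lemma wB_ftonly (d : PySem.Dict Int (List Int)) (st : DfsSt) (fs : List (Int × List Int)) :
    ∀ x, x ∈ st.vis → st.ft.contains x = false → x ∉ fs.map Prod.fst →
      (whileB d st fs).ft.contains x = false := by
  induction st, fs using whileB.induct (d := d) with
  | case1 st => intro x _ hx _; rwa [whileB_nil]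
  | case2 st fs hf hn hu ih =>
    rcases List.eq_nil_or_concat fs with rfl | ⟨fs0, ⟨fv, fl⟩, rfl⟩
    · exact absurd rfl hf
    · simp only [List.concat_eq_append, List.getLast_concat, List.dropLast_concat] at hn hu ih ⊢
      intro x hvis hft hfs
      rw [whileB_concat_visit d st fs0 fv fl hn hu]
      apply ih x ((PySem.Set.mem_add _ _ _).mpr (Or.inl hvis)) hft
      simp only [List.map_append, List.map_cons, List.map_nil, List.mem_append, List.mem_cons,
        List.mem_singleton, not_or] at hfs ⊢
      refine ⟨hfs.1, hfs.2.1, ?_, by simp⟩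
      intro h
      subst h
      exact hu hvis
  | case3 st fs hf hn hu ih =>
    rcases List.eq_nil_or_concat fs with rfl | ⟨fs0, ⟨fv, fl⟩, rfl⟩
    · exact absurd rfl hf
    · simp only [List.concat_eq_append, List.getLast_concat, List.dropLast_concat,
        Decidable.not_not] at hn hu ih ⊢
      intro x hvis hft hfs
      rw [whileB_concat_skip d st fs0 fv fl hn (by simpa using hu)]
      apply ih x hvis hft
      simp only [List.map_append, List.map_cons, List.map_nil, List.mem_append, List.mem_cons,
        List.mem_singleton, not_or] at hfs ⊢
      exact ⟨hfs.1, hfs.2.1, by simp⟩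
  | case4 st fs hf hn ih =>
    rcases List.eq_nil_or_concat fs with rfl | ⟨fs0, ⟨fv, fl⟩, rfl⟩
    · exact absurd rfl hf
    · simp only [List.concat_eq_append, List.getLast_concat, List.dropLast_concat,
        Decidable.not_not] at hn ih ⊢
      subst hn
      intro x hvis hft hfs
      simp only [List.map_append, List.map_cons, List.map_nil, List.mem_append, List.mem_cons,
        List.mem_singleton, not_or] at hfs
      rw [whileB_concat_fin d st fs0 fv]
      apply ih x hvis _ hfs.1
      simp [PySem.Dict.contains_insert, hft]
      exact fun h => absurd h hfs.2.1

-- the invariant "every finished node is visited" survives a whileB run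
lemma wB_inv (d : PySem.Dict Int (List Int)) (st : DfsSt) (fs : List (Int × List Int)) :
    (∀ y, st.ft.contains y = true → y ∈ st.vis) →
    (∀ v ∈ fs.map Prod.fst, v ∈ st.vis) →
    ∀ y, (whileB d st fs).ft.contains y = true → y ∈ (whileB d st fs).vis := by
  induction st, fs using whileB.induct (d := d) with
  | case1 st =>
    intro hInv _ y
    rw [whileB_nil]
    exact hInv y
  | case2 st fs hf hn hu ih =>
    rcases List.eq_nil_or_concat fs with rfl | ⟨fs0, ⟨fv, fl⟩, rfl⟩
    · exact absurd rfl hf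
    · simp only [List.concat_eq_append, List.getLast_concat, List.dropLast_concat] at hn hu ih ⊢
      intro hInv hfs y
      rw [whileB_concat_visit d st fs0 fv fl hn hu]
      apply ih
      · intro z hz
        exact (PySem.Set.mem_add _ _ _).mpr (Or.inl (hInv z hz))
      · intro w hw
        simp only [List.map_append, List.map_cons, List.map_nil, List.mem_append, List.mem_cons,
          List.mem_cons] at hw
        rcases hw with h | h | h
        · exact (PySem.Set.mem_add _ _ _).mpr (Or.inl (hfs w (by simp [h])))
        · exact (PySem.Set.mem_add _ _ _).mpr (Or.inl (hfs w (by simp [h])))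
        · simp at h
          exact (PySem.Set.mem_add _ _ _).mpr (Or.inr h)
  | case3 st fs hf hn hu ih =>
    rcases List.eq_nil_or_concat fs with rfl | ⟨fs0, ⟨fv, fl⟩, rfl⟩
    · exact absurd rfl hf
    · simp only [List.concat_eq_append, List.getLast_concat, List.dropLast_concat,
        Decidable.not_not] at hn hu ih ⊢
      intro hInv hfs y
      rw [whileB_concat_skip d st fs0 fv fl hn (by simpa using hu)]
      apply ih hInv
      intro w hw
      simp only [List.map_append, List.map_cons, List.map_nil, List.mem_append, List.mem_cons,
        List.mem_singleton] at hw
      rcases hw with h | h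
      · exact hfs w (by simp [h])
      · simp at h
        exact hfs w (by simp [h])
  | case4 st fs hf hn ih =>
    rcases List.eq_nil_or_concat fs with rfl | ⟨fs0, ⟨fv, fl⟩, rfl⟩
    · exact absurd rfl hf
    · simp only [List.concat_eq_append, List.getLast_concat, List.dropLast_concat,
        Decidable.not_not] at hn ih ⊢
      subst hn
      intro hInv hfs y
      rw [whileB_concat_fin d st fs0 fv]
      apply ih
      · intro z hz
        rw [PySem.Dict.contains_insert] at hz
        rcases (Bool.or_eq_true _ _).mp hz with h | h
        · have : z = fv := by simpa using h
          subst this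
          exact hfs z (by simp)
        · exact hInv z h
      · intro w hw
        exact hfs w (by simp [hw])

-- counting the still-unvisited dictionary values (induction measure of the simulation proof)
def pvCard (d : PySem.Dict Int (List Int)) (vis : List Int) : Nat :=
  ((pvUni d).toFinset \ vis.toFinset).card

lemma pvCard_mono (d : PySem.Dict Int (List Int)) {vis vis' : List Int}
    (h : ∀ x, x ∈ vis → x ∈ vis') : pvCard d vis' ≤ pvCard d vis := by
  apply Finset.card_le_card
  intro x hx
  simp only [Finset.mem_sdiff, List.mem_toFinset] at hx ⊢
  exact ⟨hx.1, fun hm => hx.2 (h x hm)⟩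

lemma pvCard_add_lt (d : PySem.Dict Int (List Int)) {vis : List Int} {u : Int}
    (hu : u ∈ pvUni d) (hv : u ∉ vis) :
    pvCard d (PySem.Set.add vis u) < pvCard d vis := by
  have huS : u ∈ (pvUni d).toFinset \ vis.toFinset := by
    simp only [Finset.mem_sdiff, List.mem_toFinset]
    exact ⟨hu, hv⟩
  have hsub : ((pvUni d).toFinset \ (PySem.Set.add vis u).toFinset)
      ⊆ ((pvUni d).toFinset \ vis.toFinset).erase u := by
    intro x hx
    simp only [Finset.mem_sdiff, List.mem_toFinset, Finset.mem_erase, PySem.Set.mem_add] at hx ⊢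
    exact ⟨fun h => hx.2 (Or.inr h), hx.1, fun h => hx.2 (Or.inl h)⟩
  calc _ ≤ (((pvUni d).toFinset \ vis.toFinset).erase u).card := Finset.card_le_card hsub
    _ < _ := Finset.card_erase_lt_of_mem huS

lemma pv_getD_len (d : PySem.Dict Int (List Int)) (u : Int) :
    (d.getD u []).length ≤ (pvUni d).length := by
  rw [PySem.Dict.getD_eq_get?_getD]
  cases h : d.get? u with
  | none => simp
  | some l =>
    simp only [Option.getD_some]
    have hmem : l.length ∈ d.items.map (fun p => p.2.length) :=
      List.mem_map.mpr ⟨(u, l), PySem.Dict.mem_items_of_get?_eq_some (d := d) h, rfl⟩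
    have hsum : (pvUni d).length = (d.items.map (fun p => p.2.length)).sum := by
      simp [pvUni, List.length_flatMap, Function.comp]
    rw [hsum]
    exact List.single_le_sum (fun _ _ => Nat.zero_le _) _ hmem

-- the heart of the equivalence: A's pending segment for an open vertex v (the neighbours that
-- were unvisited when v was opened) is processed exactly like B's frame (v, remaining-neighbours)
set_option maxHeartbeats 1000000 in
theorem pv_core (d : PySem.Dict Int (List Int)) :
    ∀ (n : Nat) (st : DfsSt) (v : Int) (l V : List Int),
      ((pvUni d).length + 1) * pvCard d st.vis + l.length ≤ n →
      (∀ y, st.ft.contains y = true → y ∈ st.vis) →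
      v ∈ st.vis → st.ft.contains v = false →
      (∀ x, x ∈ V → x ∈ st.vis) → v ∈ V →
      (∀ u, u ∈ l → u ∈ st.vis → u ∉ V → st.ft.contains u = true) →
      (∀ x, x ∈ l → x ∈ pvUni d) →
      whileA d st (v :: l.filter (fun u => decide (u ∉ V))) = whileB d st [(v, l)] := by
  intro n
  induction n using Nat.strong_induction_on with
  | _ n ih =>
    intro st v l V hn hInv hv hftv hV hvV hfin hl
    rcases List.eq_nil_or_concat l with rfl | ⟨l0, u, rfl⟩
    · show whileA d st ([] ++ [v]) = whileB d st ([] ++ [(v, ([] : List Int))])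
      rw [whileA_concat_fin d st [] v hv hftv, whileA_nil, whileB_concat_fin d st [] v,
        whileB_nil]
    · simp only [List.concat_eq_append] at hn hfin hl ⊢
      have hnlen : ((pvUni d).length + 1) * pvCard d st.vis + (l0.length + 1) ≤ n := by
        simpa using hn
      by_cases huV : u ∈ V
      · -- u was already visited when v was opened: A never pushed it, B pops it and skips
        have hfil : (l0 ++ [u]).filter (fun w => decide (w ∉ V)) =
            l0.filter (fun w => decide (w ∉ V)) := by
          simp [List.filter_append, huV]
        rw [hfil]
        rw [show ([(v, l0 ++ [u])] : List (Int × List Int)) = [] ++ [(v, l0 ++ [u])] by simp,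
          whileB_concat_skip d st [] v (l0 ++ [u]) (by simp)
            (by simpa [List.getLast_concat] using hV u huV)]
        simp only [List.getLast_concat, List.dropLast_concat, List.nil_append]
        exact ih (((pvUni d).length + 1) * pvCard d st.vis + l0.length) (by omega)
          st v l0 V le_rfl hInv hv hftv hV hvV
          (fun w hw => hfin w (by simp [hw])) (fun x hx => hl x (by simp [hx]))
      · have hfil : (l0 ++ [u]).filter (fun w => decide (w ∉ V)) =
            l0.filter (fun w => decide (w ∉ V)) ++ [u] := by
          simp [List.filter_append, huV]
        rw [hfil, ← List.cons_append]
        by_cases huvis : u ∈ st.vis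
        · -- stale copy: visited and (by the invariant carried in hfin) already finished
          have hftu : st.ft.contains u = true := hfin u (by simp) huvis huV
          rw [whileA_concat_skip d st _ u huvis hftu]
          rw [show ([(v, l0 ++ [u])] : List (Int × List Int)) = [] ++ [(v, l0 ++ [u])] by simp,
            whileB_concat_skip d st [] v (l0 ++ [u]) (by simp)
              (by simpa [List.getLast_concat] using huvis)]
          simp only [List.getLast_concat, List.dropLast_concat, List.nil_append]
          exact ih (((pvUni d).length + 1) * pvCard d st.vis + l0.length) (by omega)
            st v l0 V le_rfl hInv hv hftv hV hvV
            (fun w hw => hfin w (by simp [hw])) (fun x hx => hl x (by simp [hx]))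
        · -- fresh vertex: both sides open u
          have hu_uni : u ∈ pvUni d := hl u (by simp)
          have hftu : st.ft.contains u = false := by
            cases hcu : st.ft.contains u with
            | false => rfl
            | true => exact absurd (hInv u hcu) huvis
          have hlt : pvCard d (PySem.Set.add st.vis u) < pvCard d st.vis :=
            pvCard_add_lt d hu_uni huvis
          have hlu_len : (d.getD u []).length ≤ (pvUni d).length := pv_getD_len d u
          rw [whileA_concat_visit d st _ u huvis, List.append_assoc]
          rw [whileA_append]
          have hinner :
              whileA d ⟨st.time, st.ft, PySem.Set.add st.vis u, st.cn + 1⟩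
                ([u] ++ (d.getD u []).filter (fun w => decide (w ∉ PySem.Set.add st.vis u))) =
              whileB d ⟨st.time, st.ft, PySem.Set.add st.vis u, st.cn + 1⟩ [(u, d.getD u [])] := by
            apply ih (((pvUni d).length + 1) * pvCard d (PySem.Set.add st.vis u)
                + (d.getD u []).length)
              (by nlinarith) _ _ _ _ le_rfl
            · intro y hy
              exact (PySem.Set.mem_add _ _ _).mpr (Or.inl (hInv y hy))
            · exact (PySem.Set.mem_add _ _ _).mpr (Or.inr rfl)
            · exact hftu
            · exact fun x hx => hx
            · exact (PySem.Set.mem_add _ _ _).mpr (Or.inr rfl)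
            · intro w _ hw1 hw2
              exact absurd hw1 hw2
            · exact fun x hx => pv_mem_getD_uni hx
          rw [hinner]
          -- B side: open u, then split the two frames
          rw [show ([(v, l0 ++ [u])] : List (Int × List Int)) = [] ++ [(v, l0 ++ [u])] by simp,
            whileB_concat_visit d st [] v (l0 ++ [u]) (by simp)
              (by simpa [List.getLast_concat] using huvis)]
          simp only [List.getLast_concat, List.dropLast_concat, List.nil_append]
          rw [show ([(v, l0), (u, d.getD u [])] : List (Int × List Int)) =
            [(v, l0)] ++ [(u, d.getD u [])] by simp, whileB_append]
          -- both sides are now the same run continued from stX on v's remaining segment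
          set st1 : DfsSt := ⟨st.time, st.ft, PySem.Set.add st.vis u, st.cn + 1⟩ with hst1
          set stX : DfsSt := whileB d st1 [(u, d.getD u [])] with hstX
          have hmonoX : ∀ x, x ∈ st1.vis → x ∈ stX.vis := wB_vis_mono d st1 _
          have hcardX : pvCard d stX.vis ≤ pvCard d st1.vis := pvCard_mono d hmonoX
          apply ih (((pvUni d).length + 1) * pvCard d stX.vis + l0.length)
            (by nlinarith) _ _ _ _ le_rfl
          · exact wB_inv d st1 _ (fun y hy => (PySem.Set.mem_add _ _ _).mpr (Or.inl (hInv y hy)))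
              (by intro w hw; simp at hw; subst hw; exact (PySem.Set.mem_add _ _ _).mpr (Or.inr rfl))
          · exact hmonoX v ((PySem.Set.mem_add _ _ _).mpr (Or.inl hv))
          · apply wB_ftonly d st1 _ v ((PySem.Set.mem_add _ _ _).mpr (Or.inl hv)) hftv
            simp only [List.map_cons, List.map_nil, List.mem_cons, List.mem_singleton]
            rintro (h | h)
            · exact huvis (h ▸ hv)
            · simp at h
          · exact fun x hx => hmonoX x ((PySem.Set.mem_add _ _ _).mpr (Or.inl (hV x hx)))
          · exact hvV
          · -- newly-visited pending vertices got finished by the completed inner run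
            intro w hw hwX hwV
            by_cases hwst : w ∈ st.vis
            · exact wB_ft_mono d st1 _ w (hfin w (by simp [hw]) hwst hwV)
            · by_cases hwu : w = u
              · subst hwu
                exact wB_fin d st1 _ w (Or.inl (by simp))
              · refine wB_fin d st1 _ w (Or.inr ⟨?_, hwX⟩)
                intro hmem
                rcases (PySem.Set.mem_add _ _ _).mp hmem with h | h
                · exact hwst h
                · exact hwu h
          · exact fun x hx => hl x (by simp [hx])

-- the outer loop: one fresh start i is A's Q = [i] run = B's single initial frame run
lemma pv_top (d : PySem.Dict Int (List Int)) (st : DfsSt) (i : Int)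
    (hInv : ∀ y, st.ft.contains y = true → y ∈ st.vis) (hi : i ∉ st.vis) :
    whileA d ⟨st.time, st.ft, st.vis, 0⟩ [i] =
      whileB d ⟨st.time, st.ft, PySem.Set.add st.vis i, 1⟩ [(i, d.getD i [])] := by
  have hfti : st.ft.contains i = false := by
    cases hc : st.ft.contains i with
    | false => rfl
    | true => exact absurd (hInv i hc) hi
  rw [show ([i] : List Int) = [] ++ [i] by simp,
    whileA_concat_visit d ⟨st.time, st.ft, st.vis, 0⟩ [] i hi]
  simp only [List.nil_append, zero_add]
  exact pv_core d (((pvUni d).length + 1) * pvCard d (PySem.Set.add st.vis i)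
      + (d.getD i []).length)
    ⟨st.time, st.ft, PySem.Set.add st.vis i, 1⟩ i (d.getD i []) (PySem.Set.add st.vis i)
    le_rfl
    (fun y hy => (PySem.Set.mem_add _ _ _).mpr (Or.inl (hInv y hy)))
    ((PySem.Set.mem_add _ _ _).mpr (Or.inr rfl)) hfti
    (fun x hx => hx) ((PySem.Set.mem_add _ _ _).mpr (Or.inr rfl))
    (fun w _ hw1 hw2 => absurd hw1 hw2)
    (fun x hx => pv_mem_getD_uni hx)

lemma pv_outer (d : PySem.Dict Int (List Int)) :
    ∀ (it : List Int) (st : DfsSt) (ld : PySem.Dict Int Int),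
      (∀ y, st.ft.contains y = true → y ∈ st.vis) →
      it.foldl
        (fun (p : DfsSt × PySem.Dict Int Int) i =>
          if i ∈ p.1.vis then p
          else
            (whileA d ⟨p.1.time, p.1.ft, p.1.vis, 0⟩ [i],
              p.2.insert i (whileA d ⟨p.1.time, p.1.ft, p.1.vis, 0⟩ [i]).cn)) (st, ld) =
      it.foldl
        (fun (p : DfsSt × PySem.Dict Int Int) i =>
          if i ∈ p.1.vis then p
          else
            (whileB d ⟨p.1.time, p.1.ft, PySem.Set.add p.1.vis i, 1⟩ [(i, d.getD i [])],
              p.2.insert i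
                (whileB d ⟨p.1.time, p.1.ft, PySem.Set.add p.1.vis i, 1⟩ [(i, d.getD i [])]).cn))
        (st, ld) := by
  intro it
  induction it with
  | nil => intro st ld _; rfl
  | cons i rest ihr =>
    intro st ld hInv
    simp only [List.foldl_cons]
    by_cases hi : i ∈ st.vis
    · simp only [if_pos hi]
      exact ihr st ld hInv
    · simp only [if_neg hi]
      rw [pv_top d st i hInv hi]
      apply ihr
      exact wB_inv d ⟨st.time, st.ft, PySem.Set.add st.vis i, 1⟩ [(i, d.getD i [])]
        (fun y hy => (PySem.Set.mem_add _ _ _).mpr (Or.inl (hInv y hy)))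
        (by intro w hw; simp at hw; subst hw; exact (PySem.Set.mem_add _ _ _).mpr (Or.inr rfl))

-- ===== VERDICT (by name: the statement is the Claim_ definition above) =====
theorem dfs_spec : Claim_equal_dfs := by
  unfold Claim_equal_dfs
  intro G iterator _
  simp only [Spec_dfs, dfs, dfs_alt]
  rw [pv_outer (PySem.Dict.ofList G) iterator ⟨0, PySem.Dict.empty, PySem.Set.empty, 0⟩
    PySem.Dict.empty (by intro y hy; simp [PySem.Dict.contains_empty] at hy)]
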